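-- pv_equiv track=rewrite | github.com/IlTorre/Client_Monitor_Informativi | prova_def.py | conta_righe
-- ===== SOURCE A (Python) =====
-- def conta_righe(testo, dim_riga):
--     """
--     Funziona che conta il numero dirighe che occupa una stringa di testo
--     :param testo: il testo el quale si vuole stimare il numero di righe
--     :param dim_riga: il numero di caratteri che può contenere una riga
--     :return: il numero di righe
--     """
--     if not testo or not dim_riga:
--         return 0
--     else:
--         righe = 0
--         caratteri_letti = 0
--         for i in range(len(testo) - 1):
--             if testo[i] == '\n':
--                 righe += 1
--             else:
--                 caratteri_letti += 1
--             if caratteri_letti >= dim_riga: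
--                 righe += 1
--                 caratteri_letti = 0
--         if caratteri_letti > 0:
--             righe += 1
--         return righe
-- ===== SOURCE B (Python) =====
-- def conta_righe(testo, dim_riga):
--     if not testo or not dim_riga:
--         return 0
--     s = testo[:-1]
--     nl = s.count('\n')
--     m = len(s) - nl
--     return nl + -(-m // dim_riga)
-- ===== Notes on version B (the rewrite author's own statement) =====
-- stated objective: simpler
-- what changed: Replaces the per-character accumulator loop (row counter + wrap counter with reset) by counting newlines and non-newline characters of testo[:-1] once and taking nl + ceil(m/dim_riga) in closed form.
-- outside the precondition, e.g. on conta_righe('abc', -2): A returns 2, B returns -1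
import Mathlib
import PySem

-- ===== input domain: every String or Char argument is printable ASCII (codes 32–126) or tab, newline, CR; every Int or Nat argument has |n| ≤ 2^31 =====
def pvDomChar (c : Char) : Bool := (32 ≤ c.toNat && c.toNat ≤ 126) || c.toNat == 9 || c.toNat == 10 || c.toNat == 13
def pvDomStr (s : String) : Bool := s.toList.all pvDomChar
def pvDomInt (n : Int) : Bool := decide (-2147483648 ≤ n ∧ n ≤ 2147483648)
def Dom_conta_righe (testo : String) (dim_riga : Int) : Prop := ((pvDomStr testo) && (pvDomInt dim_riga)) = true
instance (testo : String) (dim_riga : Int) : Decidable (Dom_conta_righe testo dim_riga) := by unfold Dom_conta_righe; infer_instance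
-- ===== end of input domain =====

-- B replaces A's stateful per-character loop by two counts over testo[:-1] and a ceiling division (objective: simpler).

-- ===== PORT A =====
-- literal port of A's loop: for i in range(len(testo)-1), state (righe, caratteri_letti);
-- the index i is always in range, so pyGetD's default is never used
def conta_righe (testo : String) (dim_riga : Int) : Int :=
  if testo.toList = [] ∨ dim_riga = 0 then 0
  else
    let cs := testo.toList
    let st :=
      (PySem.List.pyRange 0 ((cs.length : Int) - 1) 1).foldl
        (fun (acc : Int × Int) i =>
          let acc' :=
            if PySem.List.pyGetD cs i ' ' = '\n' then (acc.1 + 1, acc.2)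
            else (acc.1, acc.2 + 1)
          if acc'.2 ≥ dim_riga then (acc'.1 + 1, (0 : Int)) else acc')
        ((0 : Int), (0 : Int))
    if st.2 > 0 then st.1 + 1 else st.1

-- ===== PORT B =====
-- s = testo[:-1]; nl = s.count('\n') (a one-character needle, so a character count is exact);
-- m = len(s) - nl; result nl + -(-m // dim_riga)
def conta_righe_alt (testo : String) (dim_riga : Int) : Int :=
  if testo.toList = [] ∨ dim_riga = 0 then 0
  else
    let s := PySem.List.slice testo.toList none (some (-1))
    let nl : Int := (s.count '\n' : Int)
    let m : Int := (s.length : Int) - nl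
    nl + -(PySem.Int.floordiv (-m) dim_riga)

-- ===== PRECONDITION & SPEC =====
-- Pre_ excludes negative dim_riga: a negative line width is outside the task's natural domain,
-- and there A's '>= dim_riga' reset fires after every character (A still returns a value; B's
-- ceiling division returns a different one — see the cite in claim.json).
def Pre_conta_righe (testo : String) (dim_riga : Int) : Prop := 0 ≤ dim_riga
instance (testo : String) (dim_riga : Int) : Decidable (Pre_conta_righe testo dim_riga) := by unfold Pre_conta_righe; infer_instance
def pvWitness_conta_righe : String × Int := ("ab\ncd", 3)

def Spec_conta_righe (testo : String) (dim_riga : Int) (out : Int) : Prop := out = conta_righe_alt testo dim_riga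
instance (testo : String) (dim_riga : Int) (out : Int) : Decidable (Spec_conta_righe testo dim_riga out) := by unfold Spec_conta_righe; infer_instance

-- ===== CLAIM (what is proved, stated in full; the proofs are below) =====
def Claim_equal_conta_righe : Prop := ∀ (testo : String) (dim_riga : Int), Dom_conta_righe testo dim_riga → Pre_conta_righe testo dim_riga → Spec_conta_righe testo dim_riga (conta_righe testo dim_riga)

-- ===== LEMMAS AND PROOFS =====

-- A's loop step on one character
def pvStep (d : Int) (acc : Int × Int) (c : Char) : Int × Int :=
  let acc' := if c = '\n' then (acc.1 + 1, acc.2) else (acc.1, acc.2 + 1)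
  if acc'.2 ≥ d then (acc'.1 + 1, (0 : Int)) else acc'

-- invariant of A's loop: with 0 ≤ carry < d, the state is (rows + newlines + completed wraps, wrap remainder)
lemma pvLoop_invariant (d : Int) (hd : 0 < d) :
    ∀ (s : List Char) (r c : Int), 0 ≤ c → c < d →
      s.foldl (pvStep d) (r, c) =
        (r + (s.count '\n' : Int) + (c + ((s.length : Int) - (s.count '\n' : Int))) / d,
         (c + ((s.length : Int) - (s.count '\n' : Int))) % d) := by
  intro s
  induction s with
  | nil =>
    intro r c hc0 hcd
    simp [Int.ediv_eq_zero_of_lt hc0 hcd, Int.emod_eq_of_lt hc0 hcd]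
  | cons x rest ih =>
    intro r c hc0 hcd
    rw [List.foldl_cons]
    by_cases hx : x = '\n'
    · subst hx
      have h1 : pvStep d (r, c) '\n' = (r + 1, c) := by
        simp [pvStep]; omega
      rw [h1, ih (r + 1) c hc0 hcd]
      have hcnt : ((('\n' :: rest).count '\n' : Int)) = (rest.count '\n' : Int) + 1 := by
        simp
      have hlen : ((('\n' :: rest).length : Int)) = (rest.length : Int) + 1 := by simp
      rw [hcnt, hlen]
      have hE : (c + ((rest.length : Int) + 1 - ((rest.count '\n' : Int) + 1)))
          = c + ((rest.length : Int) - (rest.count '\n' : Int)) := by ring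
      rw [hE, Prod.mk.injEq]
      exact ⟨by ring, rfl⟩
    · have hcnt : (((x :: rest).count '\n' : Int)) = (rest.count '\n' : Int) := by
        simp [List.count_cons, hx]
      have hlen : (((x :: rest).length : Int)) = (rest.length : Int) + 1 := by simp
      by_cases hw : c + 1 ≥ d
      · have hcd1 : c + 1 = d := by omega
        have h1 : pvStep d (r, c) x = (r + 1, 0) := by
          simp [pvStep, hx]; omega
        rw [h1, ih (r + 1) 0 le_rfl hd, hcnt, hlen]
        simp only [zero_add]
        have hE : (c + ((rest.length : Int) + 1 - (rest.count '\n' : Int)))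
            = ((rest.length : Int) - (rest.count '\n' : Int)) + 1 * d := by omega
        rw [hE, Int.add_mul_ediv_right _ 1 (by omega : d ≠ 0), Int.add_mul_emod_self_right,
            Prod.mk.injEq]
        exact ⟨by ring, rfl⟩
      · have h1 : pvStep d (r, c) x = (r, c + 1) := by
          simp [pvStep, hx]; omega
        rw [h1, ih r (c + 1) (by omega) (by omega), hcnt, hlen]
        have hE : (c + ((rest.length : Int) + 1 - (rest.count '\n' : Int)))
            = (c + 1) + ((rest.length : Int) - (rest.count '\n' : Int)) := by ring
        rw [hE]

-- the slice testo[:-1] is dropLast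
lemma pvSlice_dropLast (cs : List Char) :
    PySem.List.slice cs none (some (-1)) = cs.dropLast := by
  simp [PySem.List.slice, List.dropLast_eq_take]

-- ceiling division: -(-m // d) = m/d + (1 if m % d > 0 else 0), for 0 < d
lemma pvCeil (m d : Int) (hd : 0 < d) :
    -(PySem.Int.floordiv (-m) d) = m / d + (if m % d > 0 then 1 else 0) := by
  rw [PySem.Int.neg_floordiv_neg_eq_iff_of_pos hd]
  have h := Int.ediv_add_emod m d
  have h0 : 0 ≤ m % d := Int.emod_nonneg m (by omega)
  have h1 : m % d < d := Int.emod_lt_of_pos m hd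
  split_ifs with hpos
  · constructor <;> nlinarith [h, h0, h1]
  · have h2 : m % d = 0 := by omega
    constructor <;> nlinarith [h, h0, h1, h2]

theorem conta_righe_spec_aux (testo : String) (dim_riga : Int)
    (hpre : 0 ≤ dim_riga) : conta_righe testo dim_riga = conta_righe_alt testo dim_riga := by
  unfold conta_righe conta_righe_alt
  by_cases hguard : testo.toList = [] ∨ dim_riga = 0
  · rw [if_pos hguard, if_pos hguard]
  · simp only [if_neg hguard]
    push_neg at hguard
    obtain ⟨hne, hdz⟩ := hguard
    have hd : 0 < dim_riga := lt_of_le_of_ne hpre (Ne.symm hdz)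
    set cs := testo.toList with hcs
    have hlen : 0 < cs.length := List.length_pos_iff.mpr hne
    have hdl : ((cs.dropLast.length : Int)) = (cs.length : Int) - 1 := by
      simp [List.length_dropLast]; omega
    -- turn A's indexed range loop into a foldl over cs.dropLast
    have hfold :
        (PySem.List.pyRange 0 ((cs.length : Int) - 1) 1).foldl
          (fun (acc : Int × Int) i =>
            let acc' :=
              if PySem.List.pyGetD cs i ' ' = '\n' then (acc.1 + 1, acc.2)
              else (acc.1, acc.2 + 1)
            if acc'.2 ≥ dim_riga then (acc'.1 + 1, (0 : Int)) else acc')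
          ((0 : Int), (0 : Int))
        = cs.dropLast.foldl (pvStep dim_riga) ((0 : Int), (0 : Int)) := by
      rw [← hdl]
      have hcong :
          (PySem.List.pyRange 0 ((cs.dropLast.length : Int)) 1).foldl
            (fun (acc : Int × Int) i =>
              let acc' :=
                if PySem.List.pyGetD cs i ' ' = '\n' then (acc.1 + 1, acc.2)
                else (acc.1, acc.2 + 1)
              if acc'.2 ≥ dim_riga then (acc'.1 + 1, (0 : Int)) else acc')
            ((0 : Int), (0 : Int))
          = (PySem.List.pyRange 0 ((cs.dropLast.length : Int)) 1).foldl
            (fun (acc : Int × Int) i =>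
              pvStep dim_riga acc (PySem.List.pyGetD cs.dropLast i ' '))
            ((0 : Int), (0 : Int)) := by
        apply PySem.List.foldl_congr_mem
        intro acc i hi
        have hi' := (PySem.List.mem_pyRange_one).mp hi
        have hb2 : i < (cs.dropLast.length : Int) := hi'.2
        have hb1 : i < (cs.length : Int) := by omega
        have hnb : i.toNat < cs.dropLast.length := by omega
        have hget : PySem.List.pyGetD cs i ' ' = PySem.List.pyGetD cs.dropLast i ' ' := by
          rw [PySem.List.pyGetD_eq_getElem cs ' ' hi'.1 hb1,
              PySem.List.pyGetD_eq_getElem cs.dropLast ' ' hi'.1 hb2]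
          exact (List.getElem_dropLast hnb).symm
        rw [hget]; rfl
      rw [hcong]
      exact PySem.List.foldl_pyRange_pyGetD' cs.dropLast ' '
        (fun acc c => pvStep dim_riga acc c) ((0, 0)) le_rfl
    rw [hfold, pvLoop_invariant dim_riga hd cs.dropLast 0 0 le_rfl hd, pvSlice_dropLast]
    rw [pvCeil _ dim_riga hd]
    dsimp only
    simp only [zero_add, gt_iff_lt]
    split_ifs with h1 <;> ring

-- ===== VERDICT (by name: the statement is the Claim_ definition above) =====
theorem conta_righe_spec : Claim_equal_conta_righe := by
  intro testo dim_riga _ hpre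
  exact conta_righe_spec_aux testo dim_riga hpre
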